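-- pv_equiv track=rewrite | github.com/Nin17/popcorn | popcorn/phase_retrieval/pagailleIO.py | remove_filename_in_path
-- ===== SOURCE A (Python) =====
-- def remove_filename_in_path(path):
--     """remove the file name from a path
--
--     Args:
--         path (str): complete path
--
--     Returns:
--         complete path without the file name
--     """
--     if len(path.split("\\")) > 1:
--         splitter = "\\"
--     else:
--         splitter = "/"
--     path_list = path.split(splitter)[:-1]
--     new_path = ""
--     for elt in path_list:
--         new_path += elt + splitter
--
--     return new_path
-- ===== SOURCE B (Python) =====
-- def remove_filename_in_path(path):
--     """remove the file name from a path (simpler: slice at the last separator)"""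
--     splitter = "\\" if "\\" in path else "/"
--     return path[:path.rfind(splitter) + 1]
-- ===== Notes on version B (the rewrite author's own statement) =====
-- stated objective: simpler
-- what changed: B replaces A's split-on-separator / drop-last / rebuild-in-a-loop with a single slice at the last separator: path[:path.rfind(splitter) + 1], keeping the same separator-selection guard.
import Mathlib
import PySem

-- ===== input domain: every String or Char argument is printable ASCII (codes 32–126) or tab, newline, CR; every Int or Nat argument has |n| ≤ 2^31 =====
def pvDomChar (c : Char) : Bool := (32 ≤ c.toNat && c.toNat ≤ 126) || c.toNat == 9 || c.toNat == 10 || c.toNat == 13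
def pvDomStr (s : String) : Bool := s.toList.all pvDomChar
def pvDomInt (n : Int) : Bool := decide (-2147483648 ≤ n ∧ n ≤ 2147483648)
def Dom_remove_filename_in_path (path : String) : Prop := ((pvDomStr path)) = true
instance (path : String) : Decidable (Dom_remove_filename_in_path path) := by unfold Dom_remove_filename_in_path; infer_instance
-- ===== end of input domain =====

-- B removes the filename by slicing at the last separator (rfind) instead of A's
-- split / drop-last / rebuild-in-a-loop; objective: simpler (same exact result).

-- ===== PORT A =====
def remove_filename_in_path (path : String) : String :=
  let splitter : String :=
    if ((PySem.Str.split? path "\\").getD []).length > 1 then "\\" else "/"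
  let path_list : List String :=
    PySem.List.slice ((PySem.Str.split? path splitter).getD []) none (some (-1))
  path_list.foldl (fun new_path elt => new_path ++ elt ++ splitter) ""

-- ===== PORT B =====
def remove_filename_in_path_alt (path : String) : String :=
  let splitter : String := if PySem.Str.isIn "\\" path then "\\" else "/"
  PySem.Str.slice path none (some (PySem.Str.rfind path splitter + 1))

-- ===== PRECONDITION & SPEC =====
def Spec_remove_filename_in_path (path : String) (out : String) : Prop := out = remove_filename_in_path_alt path
instance (path : String) (out : String) : Decidable (Spec_remove_filename_in_path path out) := by unfold Spec_remove_filename_in_path; infer_instance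

-- ===== CLAIM (what is proved, stated in full; the proofs are below) =====
def Claim_equal_remove_filename_in_path : Prop := ∀ (path : String), Dom_remove_filename_in_path path → Spec_remove_filename_in_path path (remove_filename_in_path path)

-- ===== LEMMAS AND PROOFS =====

-- PySem.Chars.splitOn.go with a single-character separator, characterised by List.splitOnP.
theorem go_single (ch : Char) (fuel : Nat) : ∀ (l cur : List Char) (acc : List (List Char)), l.length ≤ fuel →
    PySem.Chars.splitOn.go [ch] fuel l cur acc
      = acc.reverse ++ (List.splitOnP (· == ch) l).modifyHead (cur.reverse ++ ·) := by
  induction fuel with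
  | zero =>
    intro l cur acc h
    have : l = [] := List.eq_nil_of_length_eq_zero (Nat.le_zero.mp h)
    subst this
    simp [PySem.Chars.splitOn.go]
  | succ n ih =>
    intro l cur acc h
    cases l with
    | nil => simp [PySem.Chars.splitOn.go]
    | cons c rest =>
      by_cases hc : c = ch
      · subst hc
        rw [show PySem.Chars.splitOn.go [c] (n+1) (c :: rest) cur acc
            = PySem.Chars.splitOn.go [c] n rest [] (cur.reverse :: acc) from by
          simp [PySem.Chars.splitOn.go, List.isPrefixOf]]
        rw [ih rest [] (cur.reverse :: acc) (by simpa using Nat.le_of_succ_le_succ h)]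
        simp only [List.splitOnP_cons, beq_self_eq_true, if_true, List.modifyHead_cons, List.reverse_cons, List.reverse_nil, List.nil_append, List.append_assoc, List.singleton_append]
        cases List.splitOnP (fun x => x == c) rest <;> simp
      · rw [show PySem.Chars.splitOn.go [ch] (n+1) (c :: rest) cur acc
            = PySem.Chars.splitOn.go [ch] n rest (c :: cur) acc from by
          simp [PySem.Chars.splitOn.go, List.isPrefixOf, Ne.symm hc]]
        rw [ih rest (c :: cur) acc (by simpa using Nat.le_of_succ_le_succ h)]
        simp [List.splitOnP_cons, hc, List.modifyHead_modifyHead, Function.comp_def]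

-- Python's s.split(sep) for a one-character sep is List.splitOnP on that character.
theorem splitOn_single (l : List Char) (ch : Char) :
    PySem.Chars.splitOn l [ch] = List.splitOnP (· == ch) l := by
  rw [PySem.Chars.splitOn, go_single ch (l.length + 1) l [] [] (by omega)]
  simp
  cases List.splitOnP (fun x => x == ch) l <;> simp

theorem rfind_go_found (L : List Char) (ch : Char) (k : Nat)
    (hk : [ch] <+: L.drop k) (hmax : ∀ i : Nat, k < i → ¬ [ch] <+: L.drop i) :
    ∀ j : Nat, k ≤ j → PySem.Chars.rfind.go L [ch] j = (k : Int) := by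
  intro j
  induction j with
  | zero =>
    intro h
    have : k = 0 := Nat.le_zero.mp h
    subst this
    simp only [PySem.Chars.rfind.go]
    rw [if_pos (by simpa [List.isPrefixOf_iff_prefix] using hk)]
    simp
  | succ n ih =>
    intro h
    simp only [PySem.Chars.rfind.go]
    by_cases he : k = n + 1
    · subst he
      rw [if_pos (by simpa [List.isPrefixOf_iff_prefix] using hk)]
    · rw [if_neg (by simpa [List.isPrefixOf_iff_prefix] using hmax (n+1) (by omega))]
      exact ih (by omega)

theorem rfind_go_none (L : List Char) (ch : Char)
    (h : ∀ i : Nat, ¬ [ch] <+: L.drop i) : ∀ j : Nat, PySem.Chars.rfind.go L [ch] j = -1 := by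
  intro j
  induction j with
  | zero =>
    simp only [PySem.Chars.rfind.go]
    rw [if_neg (by simpa [List.isPrefixOf_iff_prefix] using h 0)]
  | succ n ih =>
    simp only [PySem.Chars.rfind.go]
    rw [if_neg (by simpa [List.isPrefixOf_iff_prefix] using h (n+1))]
    exact ih

theorem rfind_of_not_mem (l : List Char) (ch : Char) (h : ch ∉ l) :
    PySem.Chars.rfind l [ch] = -1 := by
  apply rfind_go_none
  intro i hp
  exact h (List.mem_of_mem_drop (hp.sublist.subset (List.mem_cons_self)))

theorem rfind_last (P S : List Char) (ch : Char) (h : ch ∉ S) :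
    PySem.Chars.rfind (P ++ ch :: S) [ch] = (P.length : Int) := by
  apply rfind_go_found
  · rw [List.drop_left]
    simp
  · intro i hi hp
    have hchm : ch ∈ (P ++ ch :: S).drop i := hp.sublist.subset (List.mem_cons_self)
    obtain ⟨m, rfl⟩ : ∃ m : Nat, i = P.length + (m + 1) := ⟨i - P.length - 1, by omega⟩
    rw [List.drop_length_add_append, List.drop_succ_cons] at hchm
    exact h (List.mem_of_mem_drop hchm)
  · simp

-- every non-empty list with ch somewhere splits at the LAST occurrence of ch
theorem exists_last_occ (ch : Char) (l : List Char) (h : ch ∈ l) :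
    ∃ P S : List Char, l = P ++ ch :: S ∧ ch ∉ S := by
  induction l using List.reverseRecOn with
  | nil => cases h
  | append_singleton init a ih =>
    by_cases ha : a = ch
    · exact ⟨init, [], by simp [ha], by simp⟩
    · have : ch ∈ init := by
        rcases List.mem_append.mp h with h1 | h2
        · exact h1
        · simp at h2; exact absurd h2.symm ha
      obtain ⟨P, S, rfl, hS⟩ := ih this
      exact ⟨P, S ++ [a], by simp, by simp [hS, Ne.symm ha]⟩

-- A's rebuild loop (each piece followed by the separator) is intercalate plus a trailing separator.
theorem flatMap_append_sep (ch : Char) (ps : List (List Char)) (h : ps ≠ []) :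
    List.flatMap (· ++ [ch]) ps = [ch].intercalate ps ++ [ch] := by
  induction ps with
  | nil => exact absurd rfl h
  | cons p t ih =>
    cases t with
    | nil => simp [List.intercalate]
    | cons q r =>
      rw [List.flatMap_cons, ih (by simp)]
      simp [List.intercalate, List.intersperse_cons₂]

-- A's guard len(split) > 1 is membership of the separator.
theorem splitOnP_length_gt_one (l : List Char) (ch : Char) :
    (List.splitOnP (· == ch) l).length > 1 ↔ ch ∈ l := by
  constructor
  · intro hlen
    by_contra hm
    rw [List.splitOnP_eq_single _ _ (by intro x hx; simp; rintro rfl; exact hm hx)] at hlen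
    simp at hlen
  · intro hm
    obtain ⟨P, S, rfl, -⟩ := exists_last_occ ch l hm
    rw [List.splitOnP_append_cons _ _ _ _ (by simp)]
    have h1 := List.splitOnP_ne_nil (· == ch) P
    have h2 := List.splitOnP_ne_nil (· == ch) S
    rw [List.length_append]
    have := List.length_pos_iff.mpr h1
    have := List.length_pos_iff.mpr h2
    omega

-- the core equivalence on characters: rebuild-from-split equals take-to-last-separator
theorem key_chars (L : List Char) (ch : Char) :
    List.foldl (fun a p => a ++ p ++ [ch]) [] ((List.splitOnP (· == ch) L).dropLast)
      = PySem.List.slice L none (some (PySem.Chars.rfind L [ch] + 1)) := by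
  by_cases hm : ch ∈ L
  · obtain ⟨P, S, rfl, hS⟩ := exists_last_occ ch L hm
    rw [rfind_last P S ch hS]
    rw [PySem.List.slice_to _ (by omega)]
    have hto : ((P.length : Int) + 1).toNat = P.length + 1 := by omega
    rw [hto, List.take_append]
    rw [List.splitOnP_append_cons _ _ _ _ (by simp),
        List.splitOnP_eq_single (xs := S) _ (by intro x hx; simp; rintro rfl; exact hS hx),
        List.dropLast_concat]
    simp only [List.append_assoc]
    rw [PySem.List.foldl_append_eq_flatMap (fun p => p ++ [ch]) _ []]
    rw [flatMap_append_sep ch _ (List.splitOnP_ne_nil _ _)]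
    have hi : [ch].intercalate (List.splitOnP (fun x => x == ch) P) = P :=
      List.intercalate_splitOn P ch
    rw [hi]
    simp [List.take_of_length_le]
  · rw [rfind_of_not_mem L ch hm]
    rw [List.splitOnP_eq_single _ _ (by intro x hx; simp; rintro rfl; exact hm hx)]
    rw [show (-1 : Int) + 1 = 0 from by omega, PySem.List.slice_to _ (le_refl 0)]
    simp

theorem foldl_toList (sp : String) (parts : List String) (init : String) :
    (List.foldl (fun a e => a ++ e ++ sp) init parts).toList
      = List.foldl (fun a e => a ++ e ++ sp.toList) init.toList (parts.map String.toList) := by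
  induction parts generalizing init with
  | nil => simp
  | cons p t ih => simp [ih, String.toList_append]

-- string-level statement of the core equivalence, for either separator
theorem main_char (path sp : String) (ch : Char) (hsp : sp.toList = [ch]) :
    List.foldl (fun a e => a ++ e ++ sp) ""
        (PySem.List.slice ((PySem.Str.split? path sp).getD []) none (some (-1)))
      = PySem.Str.slice path none (some (PySem.Str.rfind path sp + 1)) := by
  apply String.toList_inj.mp
  rw [foldl_toList]
  rw [PySem.Str.split?]
  rw [show PySem.Chars.split? path.toList sp.toList
      = some (PySem.Chars.splitOn path.toList sp.toList) from by
    simp [PySem.Chars.split?, hsp]]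
  simp only [Option.map_some, Option.getD_some]
  rw [PySem.List.slice_to_neg_one]
  rw [← List.map_dropLast, List.map_map]
  rw [show (String.toList ∘ String.ofList) = id from by funext l; simp]
  rw [List.map_id, hsp, splitOn_single]
  rw [PySem.Str.slice, PySem.Str.rfind, hsp]
  simp only [String.toList_ofList, PySem.Chars.slice_eq_listSlice]
  exact key_chars path.toList ch

-- A's guard (len(path.split("\\")) > 1) and B's guard ("\\" in path) agree.
theorem guard_iff (path : String) :
    (((PySem.Str.split? path "\\").getD []).length > 1) ↔ (PySem.Str.isIn "\\" path = true) := by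
  rw [PySem.Str.isIn_iff_infix]
  rw [show ("\\" : String).toList = ['\\'] from rfl, List.singleton_infix_iff]
  rw [PySem.Str.split?]
  rw [show PySem.Chars.split? path.toList ("\\" : String).toList
      = some (PySem.Chars.splitOn path.toList ['\\']) from by
    simp [PySem.Chars.split?]]
  simp only [Option.map_some, Option.getD_some, List.length_map]
  rw [splitOn_single]
  exact splitOnP_length_gt_one path.toList '\\'

-- ===== VERDICT (by name: the statement is the Claim_ definition above) =====
theorem remove_filename_in_path_spec : Claim_equal_remove_filename_in_path := by
  intro path _
  unfold Spec_remove_filename_in_path remove_filename_in_path remove_filename_in_path_alt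
  by_cases hg : ((PySem.Str.split? path "\\").getD []).length > 1
  · rw [if_pos hg, if_pos ((guard_iff path).mp hg)]
    exact main_char path "\\" '\\' rfl
  · rw [if_neg hg, if_neg (fun h => hg ((guard_iff path).mpr h))]
    exact main_char path "/" '/' rfl
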